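-- pv_equiv track=rewrite | github.com/DanteDeRuwe/fys-ster-programmeren-1 | Reeks08/Geslachtsverandering.py | geslachtsverandering
-- ===== SOURCE A (Python) =====
-- def vertaal(woord, vertalingen):
--     '''
--     >>> vertalingen = {'hij':'zij', 'broer':'zus'}
--     >>> vertaal('hij', vertalingen)
--     'zij'
--     >>> vertaal('HIJ', vertalingen)
--     'ZIJ'
--     >>> vertaal('Hij', vertalingen)
--     'Zij'
--     >>> vertaal('broer', vertalingen)
--     'zus'
--     >>> vertaal('mijn', vertalingen)
--     'mijn'
--     '''
--     v = woord if woord.lower() not in vertalingen else vertalingen[woord.lower()]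
--     if woord.isupper():
--         return v.upper()
--     elif woord[0].isupper():
--         return v.capitalize()
--     else: return v
--
-- def geslachtsverandering(zin, vertalingen):
--     '''
--     >>> vertalingen = {'hij':'zij', 'broer':'zus'}
--     >>> geslachtsverandering('Hij is mijn broer.', vertalingen)
--     'Zij is mijn zus.'
--     '''
--     woord, woordenlijst = '', []
--     for k in zin + ' ': #eindspatie erbij
--         if k.isalpha():
--             woord += k
--         else:
--             if woord:
--                 woordenlijst.extend((woord,k))
--             else:
--                 woordenlijst.append(k)
--             woord = ''
--     for i, woord in enumerate(woordenlijst):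
--         woordenlijst[i] = vertaal(woord, vertalingen)
--     return ''.join(woordenlijst)[:-1] #eindspatie weer weg
-- ===== SOURCE B (Python) =====
-- def vertaal(woord, vertalingen):
--     v = woord if woord.lower() not in vertalingen else vertalingen[woord.lower()]
--     if woord.isupper():
--         return v.upper()
--     elif woord[0].isupper():
--         return v.capitalize()
--     else: return v
--
-- def geslachtsverandering(zin, vertalingen):
--     # one grouped pass: split zin into maximal runs of alpha / non-alpha chars;
--     # translate the alpha runs, keep the separators untouched
--     stukken = []
--     i, n = 0, len(zin)
--     while i < n:
--         alpha = zin[i].isalpha()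
--         j = i + 1
--         while j < n and zin[j].isalpha() == alpha:
--             j += 1
--         chunk = zin[i:j]
--         stukken.append(vertaal(chunk, vertalingen) if alpha else chunk)
--         i = j
--     return ''.join(stukken)
-- ===== Notes on version B (the rewrite author's own statement) =====
-- stated objective: simpler
-- what changed: Replaces A's sentinel-space char-by-char tokenizer that collects words and single separator chars into a list and then runs a second pass translating every token (separators included) and chops the last char, by a single grouped pass over maximal alpha/non-alpha runs that translates only the alpha runs and keeps separators verbatim.
-- intended difference: On inputs where some non-alpha char of zin occurs in vertalingen as a key with a value different from that char, or ' ' occurs as a key whose value is not exactly one character (empty value only matters for nonempty zin), A returns the sentence with those separator chars rewritten (and possibly the tail corrupted by the sentinel-space [:-1] trick), while B leaves separators untouched — the intended behaviour of a word-level translator. — e.g. on geslachtsverandering("a,b", [(",", "X")]): A returns "aXb", B returns "a,b"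
import Mathlib
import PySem

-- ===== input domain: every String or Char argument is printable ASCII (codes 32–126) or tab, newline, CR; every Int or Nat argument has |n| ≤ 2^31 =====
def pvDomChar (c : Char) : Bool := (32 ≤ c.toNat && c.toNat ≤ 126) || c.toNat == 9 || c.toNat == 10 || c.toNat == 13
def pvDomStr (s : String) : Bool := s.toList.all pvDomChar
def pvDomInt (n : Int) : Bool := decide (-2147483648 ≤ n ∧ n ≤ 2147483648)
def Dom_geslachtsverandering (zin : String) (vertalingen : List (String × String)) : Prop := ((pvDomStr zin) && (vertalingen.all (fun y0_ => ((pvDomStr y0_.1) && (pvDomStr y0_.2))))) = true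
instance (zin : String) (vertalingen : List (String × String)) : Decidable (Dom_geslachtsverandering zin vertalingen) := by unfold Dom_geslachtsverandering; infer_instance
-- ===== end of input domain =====

-- B replaces A's sentinel-space char-accumulating tokenizer + second translation pass by one grouped
-- pass over maximal alpha/non-alpha runs that translates only the alpha runs (separators untouched).

-- ===== PORT A =====
-- shared helper 'vertaal', used verbatim by both Pythons (on List Char; isupper/capitalize hand-ported, exact on ASCII)
def vertaalC (woord : List Char) (vertalingen : List (String × String)) : List Char :=
  let lw := PySem.Chars.lower woord
  let v := match vertalingen.find? (fun p => p.1.toList == lw) with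
    | some p => p.2.toList
    | none => woord
  -- woord.isupper(): at least one cased char and no lowercase one (exact on ASCII)
  if woord.any PySem.Chars.isupper && woord.all (fun c => !PySem.Chars.islower c) then
    PySem.Chars.upper v
  else
    match woord with
    | c :: _ =>
      if PySem.Chars.isupper c then
        -- v.capitalize(): first char uppercased, rest lowered (exact on ASCII)
        match v with
        | [] => []
        | d :: ds => PySem.Chars.upperChar d :: PySem.Chars.lower ds
      else v
    | [] => v  -- Python would raise IndexError on ''; neither program calls vertaal with ''

-- loop body of A's first pass (state = (woord, woordenlijst))
def stapA (st : List Char × List (List Char)) (k : Char) : List Char × List (List Char) :=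
  if PySem.Chars.isalpha k then (st.1 ++ [k], st.2)
  else ([], st.2 ++ (if st.1 ≠ [] then [st.1, [k]] else [[k]]))

def geslachtsverandering (zin : String) (vertalingen : List (String × String)) : String :=
  let st := (zin.toList ++ [' ']).foldl stapA ([], [])
  let lijst := st.2.map (fun w => vertaalC w vertalingen)
  String.ofList (PySem.List.slice (PySem.Chars.join [] lijst) none (some (-1)))

-- ===== PORT B =====
-- Source B's outer while-loop as recursion on the remaining suffix; the inner scan for the end of the
-- current equal-isalpha run is takeWhile/dropWhile; fuel (= remaining length) only makes it total
def altGo (vertalingen : List (String × String)) : Nat → List Char → List Char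
  | 0, _ => []
  | _ + 1, [] => []
  | n + 1, c :: rest =>
    let grp := rest.takeWhile (fun d => PySem.Chars.isalpha d == PySem.Chars.isalpha c)
    (if PySem.Chars.isalpha c then vertaalC (c :: grp) vertalingen else c :: grp)
      ++ altGo vertalingen n (rest.dropWhile (fun d => PySem.Chars.isalpha d == PySem.Chars.isalpha c))

def geslachtsverandering_alt (zin : String) (vertalingen : List (String × String)) : String :=
  String.ofList (altGo vertalingen zin.toList.length zin.toList)

-- ===== PRECONDITION & SPEC =====
-- A pushes every single non-alpha separator char (and its sentinel trailing space) through the word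
-- dictionary and then chops the last output char: on inputs where some non-alpha char of zin occurs in
-- vertalingen as a key with a value different from that char, or ' ' occurs as a key whose value is not
-- exactly one char (value '' only matters for nonempty zin), A returns the sentence with separators /
-- tail rewritten, while B leaves separators untouched — the intended behaviour of a word translator.
def D_geslachtsverandering (zin : String) (vertalingen : List (String × String)) : Prop :=
  (vertalingen.any (fun p =>
    match p.1.toList with
    | [c] => (!PySem.Chars.isalpha c && p.2.toList != [c] && zin.toList.contains c) ||
             (c == ' ' && (decide (2 ≤ p.2.toList.length) || (p.2.toList.isEmpty && zin != "")))
    | _ => false)) = true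
instance (zin : String) (vertalingen : List (String × String)) : Decidable (D_geslachtsverandering zin vertalingen) := by unfold D_geslachtsverandering; infer_instance

def Spec_geslachtsverandering (zin : String) (vertalingen : List (String × String)) (out : String) : Prop := ¬ D_geslachtsverandering zin vertalingen → out = geslachtsverandering_alt zin vertalingen
instance (zin : String) (vertalingen : List (String × String)) (out : String) : Decidable (Spec_geslachtsverandering zin vertalingen out) := by unfold Spec_geslachtsverandering; infer_instance

def pvDiffWitness_geslachtsverandering : String × (List (String × String)) := ("a,b", [(",", "X")])
def pvDiffWitnessOut_geslachtsverandering : String × String := ("aXb", "a,b")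

-- ===== CLAIM (what is proved, stated in full; the proofs are below) =====
def Claim_unchanged_geslachtsverandering : Prop := ∀ (zin : String) (vertalingen : List (String × String)), Dom_geslachtsverandering zin vertalingen → Spec_geslachtsverandering zin vertalingen (geslachtsverandering zin vertalingen)
def Claim_changed_geslachtsverandering : Prop := Dom_geslachtsverandering (pvDiffWitness_geslachtsverandering.1) (pvDiffWitness_geslachtsverandering.2) ∧ D_geslachtsverandering (pvDiffWitness_geslachtsverandering.1) (pvDiffWitness_geslachtsverandering.2) ∧ geslachtsverandering (pvDiffWitness_geslachtsverandering.1) (pvDiffWitness_geslachtsverandering.2) = pvDiffWitnessOut_geslachtsverandering.1 ∧ geslachtsverandering_alt (pvDiffWitness_geslachtsverandering.1) (pvDiffWitness_geslachtsverandering.2) = pvDiffWitnessOut_geslachtsverandering.2 ∧ pvDiffWitnessOut_geslachtsverandering.1 ≠ pvDiffWitnessOut_geslachtsverandering.2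

-- ===== LEMMAS AND PROOFS =====

-- A's tokenizer as structural recursion: tokA is what the foldl accumulates; tokFlush additionally
-- flushes the pending word at the end of input
def tokA : List Char → List Char → List (List Char)
  | [], _ => []
  | k :: rest, w =>
    if PySem.Chars.isalpha k then tokA rest (w ++ [k])
    else (if w ≠ [] then [w, [k]] else [[k]]) ++ tokA rest []

def tokFlush : List Char → List Char → List (List Char)
  | [], w => if w ≠ [] then [w] else []
  | k :: rest, w =>
    if PySem.Chars.isalpha k then tokFlush rest (w ++ [k])
    else (if w ≠ [] then [w, [k]] else [[k]]) ++ tokFlush rest []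

theorem foldl_stapA (cs : List Char) : ∀ (w : List Char) (acc : List (List Char)),
    (cs.foldl stapA (w, acc)).2 = acc ++ tokA cs w := by
  induction cs with
  | nil => intro w acc; simp [tokA]
  | cons k rest ih =>
    intro w acc
    by_cases h : PySem.Chars.isalpha k = true
    · simp [stapA, tokA, h, ih]
    · simp only [Bool.not_eq_true] at h
      simp [stapA, tokA, h, ih]

theorem tokA_append_space (cs : List Char) : ∀ w, tokA (cs ++ [' ']) w = tokFlush cs w ++ [[' ']] := by
  have hsp : PySem.Chars.isalpha ' ' = false := by decide
  induction cs with
  | nil =>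
    intro w
    by_cases hw : w = [] <;> simp [tokA, tokFlush, hsp, hw]
  | cons k rest ih =>
    intro w
    by_cases h : PySem.Chars.isalpha k = true
    · simp [tokA, tokFlush, h, ih]
    · simp only [Bool.not_eq_true] at h
      simp [tokA, tokFlush, h, ih]

theorem tokFlush_alpha_run (run : List Char) : ∀ rest w, (∀ c ∈ run, PySem.Chars.isalpha c = true) →
    tokFlush (run ++ rest) w = tokFlush rest (w ++ run) := by
  induction run with
  | nil => intro rest w _; simp
  | cons c run' ih =>
    intro rest w h
    have hc : PySem.Chars.isalpha c = true := h c (List.mem_cons_self ..)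
    have : tokFlush (c :: (run' ++ rest)) w = tokFlush (run' ++ rest) (w ++ [c]) := by
      simp [tokFlush, hc]
    simpa [ih rest (w ++ [c]) (fun x hx => h x (List.mem_cons_of_mem _ hx))] using this

theorem tokFlush_flush (rest : List Char) (w : List Char) (hw : w ≠ [])
    (h : rest = [] ∨ ∃ k r, rest = k :: r ∧ PySem.Chars.isalpha k = false) :
    tokFlush rest w = w :: tokFlush rest [] := by
  rcases h with h | ⟨k, r, hr, hk⟩
  · subst h; simp [tokFlush, hw]
  · subst hr; simp [tokFlush, hk, hw]

theorem tokFlush_nonalpha_run (run : List Char) : ∀ rest, (∀ c ∈ run, PySem.Chars.isalpha c = false) →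
    tokFlush (run ++ rest) [] = run.map (fun k => [k]) ++ tokFlush rest [] := by
  induction run with
  | nil => intro rest _; simp
  | cons c run' ih =>
    intro rest h
    have hc : PySem.Chars.isalpha c = false := h c (List.mem_cons_self ..)
    simp [tokFlush, hc, ih rest (fun x hx => h x (List.mem_cons_of_mem _ hx))]

theorem join_nil_cons (a : List Char) (l : List (List Char)) :
    PySem.Chars.join [] (a :: l) = a ++ PySem.Chars.join [] l := by
  cases l with
  | nil => simp [PySem.Chars.join_singleton, PySem.Chars.join_nil]
  | cons b t => simp [PySem.Chars.join_cons_cons]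

theorem join_nil_append (l₁ l₂ : List (List Char)) :
    PySem.Chars.join [] (l₁ ++ l₂) = PySem.Chars.join [] l₁ ++ PySem.Chars.join [] l₂ := by
  induction l₁ with
  | nil => simp [PySem.Chars.join_nil]
  | cons a t ih => simp [join_nil_cons, ih]

theorem vertaalC_single (c : Char) (vertalingen : List (String × String))
    (hc : PySem.Chars.isalpha c = false) :
    vertaalC [c] vertalingen =
      (match vertalingen.find? (fun p => p.1.toList == [c]) with
        | some p => p.2.toList
        | none => [c]) := by
  have hu : PySem.Chars.isupper c = false := by
    cases hx : PySem.Chars.isupper c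
    · rfl
    · exfalso
      have : PySem.Chars.isalpha c = true := by simp [PySem.Chars.isalpha, hx]
      simp [hc] at this
  have hl : PySem.Chars.lower [c] = [c] := by
    simp [PySem.Chars.lower, PySem.Chars.lowerChar, hu]
  unfold vertaalC
  rw [hl]
  cases hf : List.find? (fun p => p.1.toList == [c]) vertalingen with
  | none => simp [hf, hu]
  | some p => simp [hf, hu]

-- from ¬ D_'s first disjunct: A's dict lookup of a non-alpha char of zin is trivial
-- introduction lemmas for the Bool-valued change region
theorem D_intro1 {zin : String} {vertalingen : List (String × String)} {p : String × String} {c : Char}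
    (hm : p ∈ vertalingen) (hkey : p.1.toList = [c]) (hca : PySem.Chars.isalpha c = false)
    (hne : p.2.toList ≠ [c]) (hc : c ∈ zin.toList) : D_geslachtsverandering zin vertalingen := by
  unfold D_geslachtsverandering
  rw [List.any_eq_true]
  refine ⟨p, hm, ?_⟩
  rw [hkey]
  simp [hca, hne, hc]

theorem D_intro2 {zin : String} {vertalingen : List (String × String)} {p : String × String}
    (hm : p ∈ vertalingen) (hkey : p.1.toList = [' '])
    (hbad : 2 ≤ p.2.toList.length ∨ (p.2.toList = [] ∧ zin ≠ "")) :
    D_geslachtsverandering zin vertalingen := by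
  unfold D_geslachtsverandering
  rw [List.any_eq_true]
  refine ⟨p, hm, ?_⟩
  rw [hkey]
  rcases hbad with h | ⟨h1, h2⟩
  · have hd : (decide (2 ≤ p.2.toList.length)) = true := by simpa using h
    simp only [hd, Bool.true_or, Bool.or_true, Bool.and_true, beq_self_eq_true]
  · simp [h1, h2]

theorem find?_single_of_not_D (zin : String) (vertalingen : List (String × String))
    (hD : ¬ D_geslachtsverandering zin vertalingen)
    (c : Char) (hc : c ∈ zin.toList) (hca : PySem.Chars.isalpha c = false) :
    ∀ p, vertalingen.find? (fun q => q.1.toList == [c]) = some p → p.2.toList = [c] := by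
  intro p hf
  by_contra hne
  exact hD (D_intro1 (List.mem_of_find?_eq_some hf)
    (by simpa using List.find?_some hf) hca hne hc)

theorem dropWhile_head_false {p : Char → Bool} {l : List Char} {k : Char} {r : List Char}
    (h : l.dropWhile p = k :: r) : p k = false := by
  induction l with
  | nil => simp [List.dropWhile] at h
  | cons a t ih =>
    rw [List.dropWhile_cons] at h
    by_cases hp : p a = true
    · rw [if_pos hp] at h; exact ih h
    · rw [if_neg hp] at h
      injection h with h1 _
      subst h1
      simpa using hp

theorem main_lemma (vertalingen : List (String × String)) (n : Nat) : ∀ (cs : List Char),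
    cs.length ≤ n →
    (∀ c ∈ cs, PySem.Chars.isalpha c = false → vertaalC [c] vertalingen = [c]) →
    PySem.Chars.join [] ((tokFlush cs []).map (fun w => vertaalC w vertalingen))
      = altGo vertalingen n cs := by
  induction n with
  | zero =>
    intro cs hlen _
    have : cs = [] := List.eq_nil_of_length_eq_zero (Nat.le_zero.mp hlen)
    subst this
    simp [tokFlush, altGo, PySem.Chars.join_nil]
  | succ n ih =>
    intro cs hlen H
    cases cs with
    | nil => simp [tokFlush, altGo, PySem.Chars.join_nil]
    | cons c cs' =>
      have hsplit : cs'.takeWhile (fun d => PySem.Chars.isalpha d == PySem.Chars.isalpha c)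
          ++ cs'.dropWhile (fun d => PySem.Chars.isalpha d == PySem.Chars.isalpha c) = cs' :=
        List.takeWhile_append_dropWhile
      set grp := cs'.takeWhile (fun d => PySem.Chars.isalpha d == PySem.Chars.isalpha c) with hgrp
      set rest := cs'.dropWhile (fun d => PySem.Chars.isalpha d == PySem.Chars.isalpha c) with hrest
      have hlen' : rest.length ≤ n := by
        have h1 : rest.length ≤ cs'.length := by
          rw [hrest]; exact List.length_dropWhile_le _ cs'
        have h2 : cs'.length ≤ n := by simp only [List.length_cons] at hlen; omega
        omega
      have hsub : ∀ x ∈ rest, x ∈ cs' := fun x hx =>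
        (List.dropWhile_sublist _).subset hx
      have Hrest : ∀ x ∈ rest, PySem.Chars.isalpha x = false → vertaalC [x] vertalingen = [x] :=
        fun x hx hxa => H x (List.mem_cons_of_mem _ (hsub x hx)) hxa
      have IH := ih rest hlen' Hrest
      have hgmem : ∀ x ∈ grp, (PySem.Chars.isalpha x == PySem.Chars.isalpha c) = true := by
        intro x hx; rw [hgrp] at hx
        exact List.mem_takeWhile_imp (p := fun d => PySem.Chars.isalpha d == PySem.Chars.isalpha c) hx
      have hcons : (c :: grp) ++ rest = c :: cs' := by
        simp [hgrp, hrest]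
      by_cases hal : PySem.Chars.isalpha c = true
      · -- alpha run
        have hall : ∀ x ∈ c :: grp, PySem.Chars.isalpha x = true := by
          intro x hx
          rcases List.mem_cons.mp hx with hx | hx
          · subst hx; exact hal
          · have := hgmem x hx; rw [hal] at this; simpa using this
        have h1 : tokFlush (c :: cs') [] = tokFlush rest (c :: grp) := by
          rw [← hcons, tokFlush_alpha_run _ _ _ hall]; rfl
        have h2 : tokFlush rest (c :: grp) = (c :: grp) :: tokFlush rest [] := by
          apply tokFlush_flush _ _ (by simp)
          cases hr : rest with
          | nil => exact Or.inl rfl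
          | cons k r =>
            refine Or.inr ⟨k, r, rfl, ?_⟩
            have hk := dropWhile_head_false (hrest ▸ hr)
            rw [hal] at hk
            simpa using hk
        rw [h1, h2, List.map_cons, join_nil_cons, IH]
        conv_rhs => rw [altGo]
        simp [hal, hgrp, hrest]
      · -- non-alpha run
        simp only [Bool.not_eq_true] at hal
        have hall : ∀ x ∈ c :: grp, PySem.Chars.isalpha x = false := by
          intro x hx
          rcases List.mem_cons.mp hx with hx | hx
          · subst hx; exact hal
          · have := hgmem x hx; rw [hal] at this; simpa using this
        have h1 : tokFlush (c :: cs') []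
            = (c :: grp).map (fun k => [k]) ++ tokFlush rest [] := by
          rw [← hcons, tokFlush_nonalpha_run _ _ hall]
        have h2 : ((c :: grp).map (fun k => [k])).map (fun w => vertaalC w vertalingen)
            = (c :: grp).map (fun k => [k]) := by
          rw [List.map_map]
          exact List.map_congr_left (fun x hx => by
            have hxc : x ∈ c :: cs' := by
              rcases List.mem_cons.mp hx with hx | hx
              · subst hx; exact List.mem_cons_self ..
              · exact List.mem_cons_of_mem _ ((List.takeWhile_sublist _).subset hx)
            simpa using H x hxc (hall x hx))
        rw [h1, List.map_append, h2, join_nil_append, PySem.Chars.join_nil_singletons, IH]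
        conv_rhs => rw [altGo]
        simp [hal, hgrp, hrest]

-- ===== VERDICT (by name: the statement is the Claim_ definition above) =====
theorem geslachtsverandering_spec : Claim_unchanged_geslachtsverandering := by
  intro zin vertalingen _ hD
  have hD1 : ∀ c ∈ zin.toList, PySem.Chars.isalpha c = false → vertaalC [c] vertalingen = [c] := by
    intro c hc hca
    rw [vertaalC_single c vertalingen hca]
    cases hf : vertalingen.find? (fun q => q.1.toList == [c]) with
    | none => simp
    | some p => simp [find?_single_of_not_D zin vertalingen hD c hc hca p hf]
  have hfold : ((zin.toList ++ [' ']).foldl stapA ([], [])).2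
      = tokFlush zin.toList [] ++ [[' ']] := by
    rw [foldl_stapA (zin.toList ++ [' ']) [] [], tokA_append_space]
    simp
  have hmain := main_lemma vertalingen zin.toList.length zin.toList le_rfl hD1
  have hsp : PySem.Chars.isalpha ' ' = false := by decide
  show String.ofList (PySem.List.slice (PySem.Chars.join []
      ((((zin.toList ++ [' ']).foldl stapA ([], [])).2).map (fun w => vertaalC w vertalingen)))
      none (some (-1)))
    = String.ofList (altGo vertalingen zin.toList.length zin.toList)
  simp only [hfold, List.map_append, List.map_cons, List.map_nil, join_nil_append,
    PySem.Chars.join_singleton, PySem.List.slice_to_neg_one, hmain]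
  rw [vertaalC_single ' ' vertalingen hsp]
  cases hf : vertalingen.find? (fun q => q.1.toList == [' ']) with
  | none => simp
  | some p =>
    have hm := List.mem_of_find?_eq_some hf
    have hkey : p.1.toList = [' '] := by simpa using List.find?_some hf
    have hnot : ¬ (2 ≤ p.2.toList.length ∨ (p.2.toList = [] ∧ zin ≠ "")) :=
      fun hbad => hD (D_intro2 hm hkey hbad)
    simp only [not_or, not_and, not_le, not_not, ne_eq] at hnot
    obtain ⟨hlen, hrest⟩ := hnot
    cases hv : p.2.toList with
    | nil =>
      have hz : zin = "" := hrest hv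
      subst hz
      simp [hv, String.toList_empty, tokFlush, altGo, PySem.Chars.join_nil] at hmain ⊢
    | cons x xs =>
      have hxs : xs = [] := by
        rw [hv] at hlen
        simp only [List.length_cons] at hlen
        cases xs with
        | nil => rfl
        | cons y ys => simp at hlen
      subst hxs
      simp [hv]

set_option maxRecDepth 8000 in
theorem geslachtsverandering_changed : Claim_changed_geslachtsverandering := by
  unfold Claim_changed_geslachtsverandering
  decide
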